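-- pv_equiv track=rewrite | github.com/jphatbeats/titan-trading-2 | crypto_news_alerts.py | extract_trending_symbols_from_news
-- ===== SOURCE A (Python) =====
-- def extract_trending_symbols_from_news(news_data, exclude_symbols=None):
--     """Extract trending symbols from news data since we can't use premium endpoints"""
--     if exclude_symbols is None:
--         exclude_symbols = []
--
--     symbol_counts = {}
--
--     for article in news_data.get("data", []):
--         tickers = article.get("tickers", [])
--         for ticker in tickers:
--             if ticker not in exclude_symbols:
--                 symbol_counts[ticker] = symbol_counts.get(ticker, 0) + 1
--
--     # Sort by mentions
--     trending = [symbol for symbol, count in sorted(symbol_counts.items(), key=lambda x: x[1], reverse=True)]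
--     return trending[:15]  # Top 15
-- ===== SOURCE B (Python) =====
-- def extract_trending_symbols_from_news(news_data, exclude_symbols=None):
--     """Same counting pass; the sorted(...)[:15] step is replaced by a bucket sort (no comparison sort)."""
--     if exclude_symbols is None:
--         exclude_symbols = []
--
--     symbol_counts = {}
--     for article in news_data.get("data", []):
--         for ticker in article.get("tickers", []):
--             if ticker not in exclude_symbols:
--                 symbol_counts[ticker] = symbol_counts.get(ticker, 0) + 1
--
--     if not symbol_counts:
--         return []
--
--     # Bucket symbols by count, preserving first-seen order inside each bucket.
--     buckets = {}
--     for symbol, count in symbol_counts.items():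
--         buckets.setdefault(count, []).append(symbol)
--
--     max_count = max(symbol_counts.values())
--     result = []
--     for c in range(max_count, 0, -1):
--         result.extend(buckets.get(c, []))
--     return result[:15]
-- ===== Notes on version B (the rewrite author's own statement) =====
-- stated objective: alternative
-- what changed: The counting loop is kept, but sorted(symbol_counts.items(), key=count, reverse=True) is replaced by a bucket (counting) sort: symbols are grouped by count in first-seen order and the buckets are emitted from max_count down to 1.
import Mathlib
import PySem

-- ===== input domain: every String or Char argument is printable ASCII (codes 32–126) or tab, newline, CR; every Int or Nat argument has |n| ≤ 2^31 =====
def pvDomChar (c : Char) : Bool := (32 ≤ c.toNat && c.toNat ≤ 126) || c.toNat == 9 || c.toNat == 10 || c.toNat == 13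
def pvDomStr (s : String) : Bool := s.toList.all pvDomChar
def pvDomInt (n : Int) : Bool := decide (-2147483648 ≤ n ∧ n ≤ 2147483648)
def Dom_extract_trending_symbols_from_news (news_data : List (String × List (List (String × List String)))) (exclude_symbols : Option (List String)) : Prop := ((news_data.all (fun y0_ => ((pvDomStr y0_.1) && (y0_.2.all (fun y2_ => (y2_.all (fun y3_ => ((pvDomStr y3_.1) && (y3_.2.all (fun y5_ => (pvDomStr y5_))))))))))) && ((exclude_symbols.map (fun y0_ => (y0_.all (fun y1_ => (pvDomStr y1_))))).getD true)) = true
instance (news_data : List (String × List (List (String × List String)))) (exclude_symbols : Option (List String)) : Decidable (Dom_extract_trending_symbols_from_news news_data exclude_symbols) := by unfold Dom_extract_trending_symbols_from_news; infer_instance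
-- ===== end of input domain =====

-- B replaces A's sorted(items)[:15] by a bucket pass over the counts (a different algorithm, same cost in practice); same counting loop, same return value.

-- ===== PORT A =====
-- shared helper: the counting loop, textually identical in Source A and Source B
def countSymbols (news_data : List (String × List (List (String × List String)))) (exclude_symbols : List String) : PySem.Dict String Int :=
  ((PySem.Dict.mk news_data).getD "data" []).foldl
    (fun d article =>
      ((PySem.Dict.mk article).getD "tickers" []).foldl
        (fun d ticker =>
          if ticker ∈ exclude_symbols then d
          else d.insert ticker (d.getD ticker 0 + 1)) d)
    (PySem.Dict.mk [])

def extract_trending_symbols_from_news (news_data : List (String × List (List (String × List String)))) (exclude_symbols : Option (List String)) : List String :=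
  let excl := exclude_symbols.getD []
  let symbol_counts := countSymbols news_data excl
  let trending := (PySem.List.sorted symbol_counts.items (fun x => x.2) true).map (fun x => x.1)
  PySem.List.slice trending none (some 15)

-- ===== PORT B =====
def extract_trending_symbols_from_news_alt (news_data : List (String × List (List (String × List String)))) (exclude_symbols : Option (List String)) : List String :=
  let excl := exclude_symbols.getD []
  let symbol_counts := countSymbols news_data excl
  if symbol_counts.items = [] then []
  else
    -- buckets.setdefault(count, []).append(symbol)  =  modify count [] (· ++ [symbol])
    let buckets := symbol_counts.items.foldl (fun b p => b.modify p.2 [] (fun l => l ++ [p.1])) (PySem.Dict.mk [])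
    -- max() on a nonempty list never raises; .getD 0 is unreachable here
    let max_count := (PySem.List.max? symbol_counts.values (fun c => c)).getD 0
    let result := (PySem.List.pyRange max_count 0 (-1)).foldl (fun acc c => acc ++ buckets.getD c []) []
    PySem.List.slice result none (some 15)

-- ===== PRECONDITION & SPEC =====
def Spec_extract_trending_symbols_from_news (news_data : List (String × List (List (String × List String)))) (exclude_symbols : Option (List String)) (out : List String) : Prop := out = extract_trending_symbols_from_news_alt news_data exclude_symbols
instance (news_data : List (String × List (List (String × List String)))) (exclude_symbols : Option (List String)) (out : List String) : Decidable (Spec_extract_trending_symbols_from_news news_data exclude_symbols out) := by unfold Spec_extract_trending_symbols_from_news; infer_instance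

-- ===== CLAIM (what is proved, stated in full; the proofs are below) =====
def Claim_equal_extract_trending_symbols_from_news : Prop := ∀ (news_data : List (String × List (List (String × List String)))) (exclude_symbols : Option (List String)), Dom_extract_trending_symbols_from_news news_data exclude_symbols → Spec_extract_trending_symbols_from_news news_data exclude_symbols (extract_trending_symbols_from_news news_data exclude_symbols)

-- ===== LEMMAS AND PROOFS =====

-- insertBy walks past a prefix none of whose elements it goes before
lemma insertBy_skip_prefix {α : Type} (before : α → α → Bool) (x : α) (l r : List α)
    (h : ∀ y ∈ l, before x y = false) :
    PySem.List.insertBy before x (l ++ r) = l ++ PySem.List.insertBy before x r := by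
  induction l with
  | nil => rfl
  | cons y l ih =>
    simp only [List.cons_append, PySem.List.insertBy, h y (by simp)]
    simp only [Bool.false_eq_true, if_false, List.cons.injEq, true_and]
    exact ih (fun z hz => h z (by simp [hz]))

-- insertBy puts x in front when it goes before everything
lemma insertBy_front {α : Type} (before : α → α → Bool) (x : α) (r : List α)
    (h : ∀ y ∈ r, before x y = true) :
    PySem.List.insertBy before x r = x :: r := by
  cases r with
  | nil => rfl
  | cons y r => simp [PySem.List.insertBy, h y (by simp)]

-- inserting x into a concatenation of strictly-descending key blocks appends it to its own block
lemma insert_blocks {α : Type} (key : α → Int) :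
    ∀ (L : List Int), L.Pairwise (· > ·) → ∀ (x : α), key x ∈ L →
    ∀ (F : Int → List α), (∀ c ∈ L, ∀ y ∈ F c, key y = c) →
    PySem.List.insertBy (fun a b => decide (key b < key a)) x (L.flatMap F) =
      L.flatMap (fun c => F c ++ if key x == c then [x] else []) := by
  intro L
  induction L with
  | nil => intro _ x hx; exact absurd hx (by simp)
  | cons c L' ih =>
    intro hP x hx F hF
    have hgt : ∀ c' ∈ L', c' < c := fun c' hc' => (List.pairwise_cons.mp hP).1 c' hc'
    rw [List.flatMap_cons, List.flatMap_cons]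
    by_cases hc : key x = c
    · rw [insertBy_skip_prefix _ x _ _ (by
        intro y hy
        have := hF c (by simp) y hy
        simp [this, hc])]
      rw [insertBy_front _ x _ (by
        intro y hy
        obtain ⟨c', hc', hyc'⟩ := List.mem_flatMap.mp hy
        have := hF c' (by simp [hc']) y hyc'
        simp [this, hc]
        exact hgt c' hc')]
      have hrest : L'.flatMap (fun c' => F c' ++ if key x == c' then [x] else []) = L'.flatMap F := by
        rw [List.flatMap_def, List.flatMap_def]
        congr 1
        apply List.map_congr_left
        intro c' hc'
        have : ¬ (key x = c') := by have := hgt c' hc'; omega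
        simp [this]
      rw [hrest]
      simp [hc]
    · have hx' : key x ∈ L' := by
        rcases List.mem_cons.mp hx with h | h
        · exact absurd h hc
        · exact h
      have hlt : key x < c := hgt _ hx'
      rw [insertBy_skip_prefix _ x _ _ (by
        intro y hy
        have := hF c (by simp) y hy
        simp [this]; omega)]
      rw [ih (List.pairwise_cons.mp hP).2 x hx' F (fun c' hc' => hF c' (by simp [hc']))]
      have : ¬ (key x = c) := hc
      simp [this]

-- the stable reverse sort by key is the concatenation of the key-blocks, keys taken strictly descending
lemma sorted_rev_blocks {α : Type} (key : α → Int) (L : List Int) (hL : L.Pairwise (· > ·)) :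
    ∀ (its : List α), (∀ p ∈ its, key p ∈ L) →
    PySem.List.sorted its key true = L.flatMap (fun c => its.filter (fun p => key p == c)) := by
  intro its
  induction its using List.reverseRecOn with
  | nil =>
    intro _
    have : PySem.List.sorted ([] : List α) key true = [] := (PySem.List.sorted_eq_nil_iff _ _ _).mpr rfl
    simp [this]
  | append_singleton its x ih =>
    intro hcov
    rw [PySem.List.sorted_rev_eq_foldl_insertBy, List.foldl_append]
    simp only [List.foldl_cons, List.foldl_nil]
    rw [← PySem.List.sorted_rev_eq_foldl_insertBy,
        ih (fun p hp => hcov p (List.mem_append_left _ hp))]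
    rw [insert_blocks key L hL x (hcov x (by simp))
        (fun c => its.filter (fun p => key p == c))
        (by intro c _ y hy; simpa using (List.mem_filter.mp hy).2)]
    rw [List.flatMap_def, List.flatMap_def]
    congr 1
    apply List.map_congr_left
    intro c _
    by_cases hxc : key x = c
    · simp [List.filter_append, List.filter, hxc]
    · have hb : (key x == c) = false := by simp [hxc]
      simp [List.filter_append, List.filter, hb]

-- the bucket dictionary's entry at c is exactly the c-block, in first-seen order
lemma bucket_getD : ∀ (its : List (String × Int)) (b : PySem.Dict Int (List String)) (c : Int),
    (its.foldl (fun b p => b.modify p.2 [] (fun l => l ++ [p.1])) b).getD c [] =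
      b.getD c [] ++ (its.filter (fun p => p.2 == c)).map (fun p => p.1) := by
  intro its
  induction its with
  | nil => simp
  | cons p its ih =>
    intro b c
    rw [List.foldl_cons, ih]
    by_cases h : p.2 = c
    · subst h
      simp [PySem.Dict.modify, PySem.Dict.getD, PySem.Dict.get?_insert_self]
    · have hne : c ≠ p.2 := fun hh => h hh.symm
      simp [PySem.Dict.modify, PySem.Dict.getD, PySem.Dict.get?_insert_of_ne _ _ hne, h]

-- every stored count is at least 1
lemma step_pos (d : PySem.Dict String Int) (hd : ∀ q ∈ d.items, (1:Int) ≤ q.2) (t : String) :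
    ∀ q ∈ (d.insert t (d.getD t 0 + 1)).items, (1:Int) ≤ q.2 := by
  have h0 : (0:Int) ≤ d.getD t 0 := by
    unfold PySem.Dict.getD PySem.Dict.get?
    cases hf : List.find? (fun p => p.1 == t) d.items with
    | none => simp
    | some pr =>
      have := hd pr (List.mem_of_find?_eq_some hf)
      simp; omega
  intro q hq
  rw [PySem.Dict.items_insert] at hq
  split at hq
  · obtain ⟨p, hp, hq⟩ := List.mem_map.mp hq
    by_cases hpk : (p.1 == t) = true
    · simp [hpk] at hq; subst hq; simp; omega
    · simp [hpk] at hq; subst hq; exact hd p hp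
  · rcases List.mem_append.mp hq with h | h
    · exact hd q h
    · simp at h; subst h; simp; omega

lemma foldl_pos_inner (ex : List String) : ∀ (ts : List String) (d : PySem.Dict String Int),
    (∀ q ∈ d.items, (1:Int) ≤ q.2) →
    ∀ q ∈ (ts.foldl (fun d ticker => if ticker ∈ ex then d else d.insert ticker (d.getD ticker 0 + 1)) d).items, (1:Int) ≤ q.2 := by
  intro ts
  induction ts with
  | nil => intro d hd; exact hd
  | cons t ts ih =>
    intro d hd
    rw [List.foldl_cons]
    by_cases h : t ∈ ex
    · simp only [h, if_true]; exact ih d hd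
    · simp only [h, if_false]; exact ih _ (step_pos d hd t)

lemma countSymbols_pos (news_data : List (String × List (List (String × List String)))) (ex : List String) :
    ∀ q ∈ (countSymbols news_data ex).items, (1:Int) ≤ q.2 := by
  unfold countSymbols
  generalize ((PySem.Dict.mk news_data).getD "data" []) = arts
  have : ∀ (arts : List (List (String × List String))) (d : PySem.Dict String Int),
      (∀ q ∈ d.items, (1:Int) ≤ q.2) →
      ∀ q ∈ (arts.foldl (fun d article =>
        ((PySem.Dict.mk article).getD "tickers" []).foldl
          (fun d ticker => if ticker ∈ ex then d else d.insert ticker (d.getD ticker 0 + 1)) d) d).items,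
        (1:Int) ≤ q.2 := by
    intro arts
    induction arts with
    | nil => intro d hd; exact hd
    | cons a arts ih =>
      intro d hd
      rw [List.foldl_cons]
      exact ih _ (foldl_pos_inner ex _ d hd)
  exact this arts (PySem.Dict.mk []) (by simp)

-- range(m, 0, -1) written out
lemma pyRange_down (m : Int) :
    PySem.List.pyRange m 0 (-1) = (List.range m.toNat).map (fun k : Nat => (m : Int) - (k : Int)) := by
  unfold PySem.List.pyRange
  by_cases hm : (0:Int) < m
  · simp only [show (-1:Int) ≠ 0 by decide, if_false, show ¬ ((0:Int) < -1) by decide, hm, if_true]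
    have : ((m - 0 + -(-1) - 1) / -(-1)).toNat = m.toNat := by norm_num
    rw [this]
    apply List.map_congr_left
    intro k _
    ring
  · have : m.toNat = 0 := by omega
    simp [show (-1:Int) ≠ 0 by decide, hm, this]

theorem extract_trending_symbols_from_news_spec_aux
    (news_data : List (String × List (List (String × List String)))) (exclude_symbols : Option (List String)) :
    extract_trending_symbols_from_news news_data exclude_symbols =
      extract_trending_symbols_from_news_alt news_data exclude_symbols := by
  simp only [extract_trending_symbols_from_news, extract_trending_symbols_from_news_alt]
  set excl := exclude_symbols.getD [] with hexcl
  set its := (countSymbols news_data excl).items with hits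
  by_cases h : its = []
  · simp [h, PySem.List.slice]
  · simp only [h, if_false]
    have hpos : ∀ q ∈ its, (1:Int) ≤ q.2 := countSymbols_pos news_data excl
    -- the maximum count
    cases hmax : PySem.List.max? (PySem.Dict.values (countSymbols news_data excl)) (fun c => c) with
    | none =>
      exfalso
      rw [PySem.List.max?_eq_none_iff] at hmax
      exact h (by simpa [PySem.Dict.values] using hmax)
    | some m =>
      have hmem : m ∈ (countSymbols news_data excl).values := PySem.List.max?_mem hmax
      have hm1 : (1:Int) ≤ m := by
        obtain ⟨q, hq, hqm⟩ := List.mem_map.mp hmem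
        have := hpos q hq
        omega
      have hub : ∀ p ∈ its, p.2 ≤ m := by
        intro p hp
        exact PySem.List.max?_isMax hmax p.2 (List.mem_map.mpr ⟨p, hp, rfl⟩)
      set L := PySem.List.pyRange m 0 (-1) with hL
      have hLp : L.Pairwise (· > ·) := by
        rw [hL, pyRange_down]
        refine List.pairwise_map.mpr (List.pairwise_lt_range.imp ?_)
        intro a b hab
        simp only [gt_iff_lt]
        omega
      have hcov : ∀ p ∈ its, p.2 ∈ L := by
        intro p hp
        rw [hL, pyRange_down]
        refine List.mem_map.mpr ⟨(m - p.2).toNat, ?_, ?_⟩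
        · have := hpos p hp; have := hub p hp
          refine List.mem_range.mpr ?_
          omega
        · have := hpos p hp; have := hub p hp
          omega
      rw [Option.getD_some, PySem.List.foldl_append_eq_flatMap, List.nil_append]
      rw [sorted_rev_blocks (fun x : String × Int => x.2) L hLp its hcov]
      congr 1
      rw [List.map_flatMap]
      rw [List.flatMap_def, List.flatMap_def]
      congr 1
      apply List.map_congr_left
      intro c _
      rw [bucket_getD its (PySem.Dict.mk []) c]
      simp [PySem.Dict.getD, PySem.Dict.get?]

-- ===== VERDICT (by name: the statement is the Claim_ definition above) =====
theorem extract_trending_symbols_from_news_spec : Claim_equal_extract_trending_symbols_from_news := by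
  intro news_data exclude_symbols _
  exact extract_trending_symbols_from_news_spec_aux news_data exclude_symbols
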